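-- pv_equiv track=rewrite | github.com/rmw874/bsc_project | seggers/Train.py | generate_color_to_class_mapping
-- ===== SOURCE A (Python) =====
-- def generate_color_to_class_mapping(num_rows, num_columns):
--     """Generates a color-to-class mapping where each (R, G, 0) color maps to a class."""
--     color_to_class = {}
--     class_label = 1
--     for row in range(1, num_rows + 1):
--         for col in range(1, num_columns + 1):
--             rgb_color = (row, col, 0)  # Color (R, G, 0)
--             color_to_class[rgb_color] = class_label
--             class_label += 1
--     return color_to_class
-- ===== SOURCE B (Python) =====
-- def generate_color_to_class_mapping(num_rows, num_columns):
--     """Generates a color-to-class mapping where each (R, G, 0) color maps to a class."""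
--     if num_rows < 1 or num_columns < 1:
--         return {}
--     return {(idx // num_columns + 1, idx % num_columns + 1, 0): idx + 1
--             for idx in range(num_rows * num_columns)}
-- ===== Notes on version B (the rewrite author's own statement) =====
-- stated objective: alternative
-- what changed: Replaces the two nested row/column loops with a manually incremented label by a single flat dict comprehension over range(num_rows*num_columns) that reconstructs (row, col) from the index by divmod, with an explicit guard returning {} when either dimension is < 1.
import Mathlib
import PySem

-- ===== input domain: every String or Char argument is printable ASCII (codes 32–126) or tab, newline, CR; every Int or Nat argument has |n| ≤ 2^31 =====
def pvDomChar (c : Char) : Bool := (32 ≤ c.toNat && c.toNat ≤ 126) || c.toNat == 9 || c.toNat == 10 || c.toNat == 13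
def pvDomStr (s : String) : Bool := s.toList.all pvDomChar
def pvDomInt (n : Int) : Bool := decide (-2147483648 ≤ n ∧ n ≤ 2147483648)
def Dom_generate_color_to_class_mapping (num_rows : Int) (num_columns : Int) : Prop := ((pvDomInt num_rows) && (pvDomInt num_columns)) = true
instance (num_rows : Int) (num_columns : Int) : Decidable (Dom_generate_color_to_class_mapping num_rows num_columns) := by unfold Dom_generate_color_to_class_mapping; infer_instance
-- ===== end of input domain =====

-- B replaces A's nested row/column loops (with a manually incremented class label) by one flat
-- dict comprehension over range(num_rows*num_columns) that decodes (row, col) by divmod; same values.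

-- ===== PORT A =====
def generate_color_to_class_mapping (num_rows : Int) (num_columns : Int) : List (Int × Int × Int × Int) :=
  -- color_to_class = {}; class_label = 1; nested for-loops inserting (row, col, 0) ↦ label
  let st :=
    (PySem.List.pyRange 1 (num_rows + 1)).foldl
      (fun (st : PySem.Dict (Int × Int × Int) Int × Int) row =>
        (PySem.List.pyRange 1 (num_columns + 1)).foldl
          (fun st col => (st.1.insert (row, col, (0 : Int)) st.2, st.2 + 1)) st)
      (PySem.Dict.empty, 1)
  -- the dict (keyed by (R, G, 0) triples) flattened to 4-tuples per the type convention
  st.1.items.map (fun p => (p.1.1, p.1.2.1, p.1.2.2, p.2))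

-- ===== PORT B =====
def generate_color_to_class_mapping_alt (num_rows : Int) (num_columns : Int) : List (Int × Int × Int × Int) :=
  if num_rows < 1 ∨ num_columns < 1 then []
  else
    ((PySem.Dict.ofList
        ((PySem.List.pyRange 0 (num_rows * num_columns)).map
          (fun idx => ((PySem.Int.floordiv idx num_columns + 1,
                        PySem.Int.mod idx num_columns + 1, (0 : Int)), idx + 1)))).items).map
      (fun p => (p.1.1, p.1.2.1, p.1.2.2, p.2))

-- ===== PRECONDITION & SPEC =====
def Spec_generate_color_to_class_mapping (num_rows : Int) (num_columns : Int) (out : List (Int × Int × Int × Int)) : Prop := out = generate_color_to_class_mapping_alt num_rows num_columns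
instance (num_rows : Int) (num_columns : Int) (out : List (Int × Int × Int × Int)) : Decidable (Spec_generate_color_to_class_mapping num_rows num_columns out) := by unfold Spec_generate_color_to_class_mapping; infer_instance

-- ===== CLAIM (what is proved, stated in full; the proofs are below) =====
def Claim_equal_generate_color_to_class_mapping : Prop := ∀ (num_rows : Int) (num_columns : Int), Dom_generate_color_to_class_mapping num_rows num_columns → Spec_generate_color_to_class_mapping num_rows num_columns (generate_color_to_class_mapping num_rows num_columns)

-- ===== LEMMAS AND PROOFS =====

-- A's inner (column) loop, started from a dict d whose keys avoid row r's keys, appends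
-- row r's block to d.items and advances the label by the number of iterations.
theorem pv_inner_items (r : Int) (a b : Int) (d : PySem.Dict (Int × Int × Int) Int) (l : Int)
    (hfresh : ∀ c ∈ PySem.List.pyRange a b, d.contains (r, c, 0) = false) :
    (PySem.List.pyRange a b).foldl
        (fun (st : PySem.Dict (Int × Int × Int) Int × Int) col =>
          (st.1.insert (r, col, (0 : Int)) st.2, st.2 + 1)) (d, l)
      = (PySem.Dict.mk (d.items ++ (PySem.List.pyRange a b).map (fun c => ((r, c, (0 : Int)), l + (c - a)))),
         l + ((b - a) ⊔ 0)) := by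
  induction hn : (b - a).toNat generalizing a d l with
  | zero =>
      have hba : b ≤ a := by omega
      have h0 : (b - a) ⊔ 0 = 0 := by omega
      simp [PySem.List.pyRange_one_eq_nil hba, h0]
  | succ n ih =>
      have hab : a < b := by omega
      rw [PySem.List.pyRange_one_cons hab]
      simp only [List.foldl_cons]
      rw [ih (a + 1) _ (l + 1) ?_ (by omega)]
      · rw [PySem.Dict.items_insert_of_not_contains _ _
            (hfresh a (by rw [PySem.List.mem_pyRange_one]; omega))]
        have hmap : (PySem.List.pyRange (a + 1) b).map (fun c => ((r, c, (0:Int)), l + 1 + (c - (a + 1))))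
            = (PySem.List.pyRange (a + 1) b).map (fun c => ((r, c, (0:Int)), l + (c - a))) := by
          apply List.map_congr_left; intro c _; congr 1; ring
        have hsnd : l + 1 + ((b - (a + 1)) ⊔ 0) = l + ((b - a) ⊔ 0) := by omega
        rw [hmap, hsnd, List.map_cons, List.append_assoc, List.singleton_append,
            show l + (a - a) = l from by ring]
      · intro c hc
        rw [PySem.List.mem_pyRange_one] at hc
        rw [PySem.Dict.contains_insert]
        have h1 : ((r, c, (0 : Int)) == (r, a, (0 : Int))) = false := by
          have hca : c ≠ a := by omega
          simp [Prod.ext_iff, hca]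
        rw [h1, Bool.false_or]
        exact hfresh c (by rw [PySem.List.mem_pyRange_one]; omega)

-- A's outer (row) loop appends one block per row, each of length num_columns ⊔ 0.
theorem pv_outer_items (nc : Int) (a b : Int) (d : PySem.Dict (Int × Int × Int) Int) (l : Int)
    (hfresh : ∀ r c, r ∈ PySem.List.pyRange a b → d.contains (r, c, 0) = false) :
    (PySem.List.pyRange a b).foldl
        (fun (st : PySem.Dict (Int × Int × Int) Int × Int) row =>
          (PySem.List.pyRange 1 (nc + 1)).foldl
            (fun st col => (st.1.insert (row, col, (0 : Int)) st.2, st.2 + 1)) st) (d, l)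
      = (PySem.Dict.mk (d.items ++ (PySem.List.pyRange a b).flatMap
            (fun r => (PySem.List.pyRange 1 (nc + 1)).map
              (fun c => ((r, c, (0 : Int)), l + (r - a) * (nc ⊔ 0) + (c - 1))))),
         l + ((b - a) ⊔ 0) * (nc ⊔ 0)) := by
  induction hn : (b - a).toNat generalizing a d l with
  | zero =>
      have hba : b ≤ a := by omega
      have h0 : (b - a) ⊔ 0 = 0 := by omega
      simp [PySem.List.pyRange_one_eq_nil hba, h0]
  | succ n ih =>
      have hab : a < b := by omega
      rw [PySem.List.pyRange_one_cons hab]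
      simp only [List.foldl_cons]
      rw [pv_inner_items a 1 (nc + 1) d l
          (fun c _ => hfresh a c (by rw [PySem.List.mem_pyRange_one]; omega))]
      have hlen : (nc + 1 - 1) ⊔ 0 = nc ⊔ 0 := by omega
      rw [hlen]
      rw [ih (a + 1) _ (l + (nc ⊔ 0)) ?_ (by omega)]
      · have hsum : (PySem.List.pyRange 1 (nc + 1)).map (fun c => ((a, c, (0:Int)), l + (c - 1)))
            = (PySem.List.pyRange 1 (nc + 1)).map (fun c => ((a, c, (0:Int)), l + (a - a) * (nc ⊔ 0) + (c - 1))) := by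
          apply List.map_congr_left; intro c _; congr 1; ring
        have hf : (fun r => (PySem.List.pyRange 1 (nc + 1)).map
              (fun c => ((r, c, (0:Int)), l + (nc ⊔ 0) + (r - (a + 1)) * (nc ⊔ 0) + (c - 1))))
            = (fun r => (PySem.List.pyRange 1 (nc + 1)).map
              (fun c => ((r, c, (0:Int)), l + (r - a) * (nc ⊔ 0) + (c - 1)))) := by
          funext r; congr 1; funext c; congr 1; ring
        have hsnd : l + (nc ⊔ 0) + ((b - (a + 1)) ⊔ 0) * (nc ⊔ 0) = l + ((b - a) ⊔ 0) * (nc ⊔ 0) := by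
          have h1 : (b - a) ⊔ 0 = (b - (a + 1)) ⊔ 0 + 1 := by omega
          rw [h1]; ring
        rw [hf, hsnd, List.flatMap_cons]
        congr 1
        apply congrArg PySem.Dict.mk
        show (d.items ++ (PySem.List.pyRange 1 (nc + 1)).map (fun c => ((a, c, (0:Int)), l + (c - 1)))) ++ _ = _
        rw [hsum, List.append_assoc]
      · intro r c hr
        rw [PySem.List.mem_pyRange_one] at hr
        rw [PySem.Dict.contains_mk, List.any_append, Bool.or_eq_false_iff]
        constructor
        · rw [← PySem.Dict.contains_mk d.items]
          exact hfresh r c (by rw [PySem.List.mem_pyRange_one]; omega)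
        · simp only [List.any_map, List.any_eq_false, Function.comp]
          intro c' _
          have har : a ≠ r := by omega
          simp [Prod.ext_iff, har]

-- the injective key function of B's comprehension
theorem pv_key_inj (nc : Int) :
    Function.Injective (fun i : Int =>
      (PySem.Int.floordiv i nc + 1, PySem.Int.mod i nc + 1, (0 : Int))) := by
  intro x y h
  simp only [Prod.ext_iff] at h
  have hx := PySem.Int.floordiv_mul_add_mod x nc
  have hy := PySem.Int.floordiv_mul_add_mod y nc
  have h1 : PySem.Int.floordiv x nc = PySem.Int.floordiv y nc := by omega
  have h2 : PySem.Int.mod x nc = PySem.Int.mod y nc := by omega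
  rw [h1, h2] at hx
  omega

-- definitional glue
theorem pv_items_empty : (PySem.Dict.empty : PySem.Dict (Int × Int × Int) Int).items = [] := rfl

-- definitional glue: dict.update is the insert fold
theorem pv_update_foldl (d : PySem.Dict (Int × Int × Int) Int) (L : List ((Int × Int × Int) × Int)) :
    d.update L = L.foldl (fun d p => d.insert p.1 p.2) d := rfl

-- B's comprehension has pairwise-distinct keys, so building the dict keeps the list as items.
theorem pv_alt_items (nr nc : Int) :
    (PySem.Dict.ofList
        ((PySem.List.pyRange 0 (nr * nc)).map
          (fun idx => ((PySem.Int.floordiv idx nc + 1,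
                        PySem.Int.mod idx nc + 1, (0 : Int)), idx + 1)))).items
      = (PySem.List.pyRange 0 (nr * nc)).map
          (fun idx => ((PySem.Int.floordiv idx nc + 1,
                        PySem.Int.mod idx nc + 1, (0 : Int)), idx + 1)) := by
  simp only [PySem.Dict.ofList]
  rw [pv_update_foldl]
  rw [PySem.Dict.items_foldl_insert_fresh (k := Prod.fst) (v := Prod.snd)]
  · simp [pv_items_empty]
  · intro p _
    rfl
  · rw [List.map_map]
    exact ((PySem.List.nodup_pyRange_one 0 (nr * nc)).map (pv_key_inj nc))

-- row-major double loop = flat divmod loop (the core equality of the two algorithms)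
theorem pv_flat (nc : Int) (hc : 1 ≤ nc) (k : Nat) :
    (PySem.List.pyRange 1 ((k : Int) + 1)).flatMap
        (fun r => (PySem.List.pyRange 1 (nc + 1)).map
          (fun c => ((r, c, (0 : Int)), 1 + (r - 1) * nc + (c - 1))))
      = (PySem.List.pyRange 0 ((k : Int) * nc)).map
          (fun i => ((PySem.Int.floordiv i nc + 1, PySem.Int.mod i nc + 1, (0 : Int)), i + 1)) := by
  induction k with
  | zero =>
      simp [PySem.List.pyRange_one_eq_nil (le_refl (1 : Int)),
            PySem.List.pyRange_one_eq_nil (le_refl (0 : Int))]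
  | succ k ih =>
      have hcast : ((k + 1 : Nat) : Int) = (k : Int) + 1 := by push_cast; ring
      rw [hcast]
      rw [PySem.List.pyRange_one_succ_right (show (1:Int) ≤ (k : Int) + 1 by omega), List.flatMap_append, ih]
      have hmul0 : (0 : Int) ≤ (k : Int) * nc := by positivity
      have hmul1 : (k : Int) * nc ≤ ((k : Int) + 1) * nc := by nlinarith [Int.natCast_nonneg k]
      rw [PySem.List.pyRange_one_append 0 ((k : Int) * nc) (((k : Int) + 1) * nc) hmul0 hmul1,
          List.map_append]
      congr 1
      simp only [List.flatMap_cons, List.flatMap_nil, List.append_nil]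
      rw [PySem.List.pyRange_one 1 (nc + 1), PySem.List.pyRange_one ((k : Int) * nc) (((k : Int) + 1) * nc)]
      have hl1 : (nc + 1 - 1).toNat = nc.toNat := by omega
      have hl2 : (((k : Int) + 1) * nc - (k : Int) * nc) = nc := by ring
      rw [hl1, hl2, List.map_map, List.map_map]
      apply List.map_congr_left
      intro j hj
      have hjnc : (j : Int) < nc := by
        rw [List.mem_range] at hj
        omega
      have hdiv : PySem.Int.floordiv ((k : Int) * nc + (j : Int)) nc = (k : Int) := by
        rw [PySem.Int.floordiv_eq_iff_of_pos (by omega)]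
        constructor
        · have : (0 : Int) ≤ (j : Int) := by positivity
          linarith
        · nlinarith
      have hmod : PySem.Int.mod ((k : Int) * nc + (j : Int)) nc = (j : Int) := by
        have := PySem.Int.floordiv_mul_add_mod ((k : Int) * nc + (j : Int)) nc
        rw [hdiv] at this
        omega
      simp only [Function.comp]
      rw [hdiv, hmod]
      have h1 : (1 : Int) + (j : Int) = (j : Int) + 1 := by ring
      rw [h1]
      have h2 : (1 : Int) + ((k : Int) + 1 - 1) * nc + ((j : Int) + 1 - 1) = (k : Int) * nc + (j : Int) + 1 := by ring
      rw [h2]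

-- ===== VERDICT (by name: the statement is the Claim_ definition above) =====
theorem generate_color_to_class_mapping_spec : Claim_equal_generate_color_to_class_mapping := by
  intro nr nc _
  unfold Spec_generate_color_to_class_mapping
  show generate_color_to_class_mapping nr nc = generate_color_to_class_mapping_alt nr nc
  unfold generate_color_to_class_mapping generate_color_to_class_mapping_alt
  rw [pv_outer_items nc 1 (nr + 1) PySem.Dict.empty 1 (by intro r c _; rfl)]
  by_cases hg : nr < 1 ∨ nc < 1
  · rw [if_pos hg]
    rcases hg with h | h
    · rw [PySem.List.pyRange_one_eq_nil (show nr + 1 ≤ 1 by omega)]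
      simp [pv_items_empty]
    · rw [PySem.List.pyRange_one_eq_nil (show nc + 1 ≤ 1 by omega)]
      simp [pv_items_empty]
  · rw [if_neg hg]
    obtain ⟨hr, hc⟩ : 1 ≤ nr ∧ 1 ≤ nc := by omega
    rw [pv_alt_items nr nc]
    have hmax : nc ⊔ 0 = nc := by omega
    have hk : nr = ((nr.toNat : Int)) := by omega
    rw [pv_items_empty, List.nil_append, hmax]
    rw [hk]
    rw [pv_flat nc (by omega) nr.toNat]
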